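-- pv_equiv track=rewrite | github.com/derragmaria-code/image-compression-research | lossy/dct codec.py | coeffs_to_dc_ac
-- ===== SOURCE A (Python) =====
-- def coeffs_to_dc_ac(coeffs: list) -> tuple:
--     dc_stream = []
--     ac_stream = []
--     prev_dc = 0
--     for zz in coeffs:
--         dc = int(zz[0])
--         dc_stream.append(dc - prev_dc)
--         prev_dc = dc
--
--         zeros = 0
--         for v in zz[1:]:
--             v = int(v)
--             if v == 0:
--                 zeros += 1
--             else:
--                 while zeros >= 16:
--                     ac_stream.append((15, 0))   # ZRL
--                     zeros -= 16
--                 ac_stream.append((zeros, v))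
--                 zeros = 0
--         ac_stream.append((0, 0))   # EOB
--
--     return dc_stream, ac_stream
-- ===== SOURCE B (Python) =====
-- def coeffs_to_dc_ac(coeffs: list) -> tuple:
--     # DC: difference consecutive block DC values directly.
--     dcs = [int(zz[0]) for zz in coeffs]
--     dc_stream = [d - p for d, p in zip(dcs, [0] + dcs[:-1])]
--     # AC: per block, collect nonzero (index, value) pairs, then turn index
--     # gaps into runs (run // 16 ZRLs plus the remainder run), EOB per block.
--     ac_stream = []
--     for zz in coeffs:
--         nz = [(i, int(v)) for i, v in enumerate(zz) if i >= 1 and int(v) != 0]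
--         prev = 0
--         for i, v in nz:
--             run = i - prev - 1
--             ac_stream.extend([(15, 0)] * (run // 16))
--             ac_stream.append((run % 16, v))
--             prev = i
--         ac_stream.append((0, 0))
--     return dc_stream, ac_stream
-- ===== Notes on version B (the rewrite author's own statement) =====
-- stated objective: alternative
-- what changed: B computes the DC stream by zipping the DC list with its shifted self instead of threading prev_dc through the loop, and derives each block's AC pairs from the nonzero (index,value) pairs of the block (zero runs = index gaps, emitted as run//16 ZRLs plus the remainder run%16) instead of counting zeros element by element with a while-loop.
import Mathlib
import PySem

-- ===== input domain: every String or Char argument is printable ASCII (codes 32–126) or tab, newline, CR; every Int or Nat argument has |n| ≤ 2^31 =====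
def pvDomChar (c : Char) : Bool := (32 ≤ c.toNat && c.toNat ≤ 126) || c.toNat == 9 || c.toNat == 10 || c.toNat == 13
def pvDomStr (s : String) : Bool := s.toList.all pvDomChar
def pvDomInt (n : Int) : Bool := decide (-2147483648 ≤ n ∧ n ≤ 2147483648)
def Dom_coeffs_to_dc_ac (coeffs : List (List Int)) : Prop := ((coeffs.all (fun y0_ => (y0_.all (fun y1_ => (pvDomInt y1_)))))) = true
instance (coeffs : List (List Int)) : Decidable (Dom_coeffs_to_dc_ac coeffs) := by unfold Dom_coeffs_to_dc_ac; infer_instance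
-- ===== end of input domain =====

-- B replaces A's prev_dc threading by a zip-with-shift over the DC list and A's
-- element-by-element zero counter by a walk over each block's nonzero (index,value)
-- pairs, turning index gaps into runs (alternative decomposition, same cost).


-- ===== PORT A =====
-- A's `while zeros >= 16: append (15,0); zeros -= 16` loop.
def zrlLoop (acs : List (Int × Int)) (zeros : Int) : List (Int × Int) × Int :=
  if h : 16 ≤ zeros then zrlLoop (acs ++ [(15, 0)]) (zeros - 16) else (acs, zeros)
termination_by zeros.toNat
decreasing_by omega

-- A's inner `for v in zz[1:]` body (state = (ac_stream, zeros))
def stepA (p : List (Int × Int) × Int) (v : Int) : List (Int × Int) × Int :=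
  if v = 0 then (p.1, p.2 + 1)
  else
    let q := zrlLoop p.1 p.2
    (q.1 ++ [(q.2, v)], 0)

-- A's outer `for zz in coeffs` body (state = (dc_stream, ac_stream, prev_dc));
-- zz[0] via pyGet? (its `none` = IndexError is excluded by Pre_)
def stepOuterA (st : List Int × List (Int × Int) × Int) (zz : List Int) : List Int × List (Int × Int) × Int :=
  let dc := (PySem.List.pyGet? zz 0).getD 0
  let inner := (PySem.List.slice zz (some 1) none).foldl stepA (st.2.1, 0)
  (st.1 ++ [dc - st.2.2], inner.1 ++ [(0, 0)], dc)

-- literal transliteration of A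
def coeffs_to_dc_ac (coeffs : List (List Int)) : List Int × (List (Int × Int)) :=
  let st := coeffs.foldl stepOuterA ([], [], 0)
  (st.1, st.2.1)

-- ===== PORT B =====
-- B's inner loop body over the nonzero (index, value) pairs (state = (ac_stream, prev))
def stepB (p : List (Int × Int) × Int) (iv : Int × Int) : List (Int × Int) × Int :=
  let run := iv.1 - p.2 - 1
  (p.1 ++ List.replicate (PySem.Int.floordiv run 16).toNat (15, 0)
       ++ [(PySem.Int.mod run 16, iv.2)], iv.1)

-- B's per-block AC step: filter the nonzero pairs of enumerate(zz), walk them, append EOB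
def stepOuterB (acs : List (Int × Int)) (zz : List Int) : List (Int × Int) :=
  let nz := (PySem.List.enumerate zz 0).filter (fun p => 1 ≤ p.1 ∧ p.2 ≠ 0)
  (nz.foldl stepB (acs, 0)).1 ++ [(0, 0)]

-- literal transliteration of B
def coeffs_to_dc_ac_alt (coeffs : List (List Int)) : List Int × (List (Int × Int)) :=
  let dcs := coeffs.map (fun zz => (PySem.List.pyGet? zz 0).getD 0)
  let dc_stream := (dcs.zip (0 :: dcs.dropLast)).map (fun p => p.1 - p.2)
  let ac_stream := coeffs.foldl stepOuterB []
  (dc_stream, ac_stream)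

-- ===== PRECONDITION & SPEC =====
-- Pre_ excludes exactly the inputs on which A raises IndexError: a block with no coefficients.
def Pre_coeffs_to_dc_ac (coeffs : List (List Int)) : Prop := ∀ zz ∈ coeffs, zz ≠ []
instance (coeffs : List (List Int)) : Decidable (Pre_coeffs_to_dc_ac coeffs) := by unfold Pre_coeffs_to_dc_ac; infer_instance
def pvWitness_coeffs_to_dc_ac : List (List Int) := [[3, 0, 0, 5, 1], [7, 2]]

def Spec_coeffs_to_dc_ac (coeffs : List (List Int)) (out : List Int × (List (Int × Int))) : Prop := out = coeffs_to_dc_ac_alt coeffs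
instance (coeffs : List (List Int)) (out : List Int × (List (Int × Int))) : Decidable (Spec_coeffs_to_dc_ac coeffs out) := by unfold Spec_coeffs_to_dc_ac; infer_instance

-- ===== CLAIM (what is proved, stated in full; the proofs are below) =====
def Claim_equal_coeffs_to_dc_ac : Prop := ∀ (coeffs : List (List Int)), Dom_coeffs_to_dc_ac coeffs → Pre_coeffs_to_dc_ac coeffs → Spec_coeffs_to_dc_ac coeffs (coeffs_to_dc_ac coeffs)

-- ===== LEMMAS AND PROOFS =====

-- reference encoding of one block's tail (rest = zz[1:]) with pending zero count z
def encode : List Int → Int → List (Int × Int)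
  | [], _ => []
  | v :: t, z =>
    if v = 0 then encode t (z + 1)
    else List.replicate (z / 16).toNat (15, 0) ++ [(z % 16, v)] ++ encode t 0

-- DC differences of the list of block DC values, previous DC = prev
def diffsI : List Int → Int → List Int
  | [], _ => []
  | h :: t, prev => (h - prev) :: diffsI t h

-- all AC pairs, block by block
def acAll : List (List Int) → List (Int × Int)
  | [] => []
  | zz :: t => encode (zz.drop 1) 0 ++ [(0, 0)] ++ acAll t

def dcOf (zz : List Int) : Int := (PySem.List.pyGet? zz 0).getD 0

def lastDC : List (List Int) → Int → Int
  | [], prev => prev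
  | zz :: t, _ => lastDC t (dcOf zz)

lemma zrlLoop_eq (acs : List (Int × Int)) (z : Int) (hz : 0 ≤ z) :
    zrlLoop acs z = (acs ++ List.replicate (z / 16).toNat (15, 0), z % 16) := by
  rw [zrlLoop]
  split
  · rename_i h
    rw [zrlLoop_eq _ _ (by omega)]
    have h1 : ((z - 16) / 16).toNat + 1 = (z / 16).toNat := by omega
    have h2 : (z - 16) % 16 = z % 16 := by omega
    rw [← h1, h2]
    simp [List.replicate_succ, List.append_assoc]
  · rename_i h
    have h1 : (z / 16).toNat = 0 := by omega
    have h2 : z % 16 = z := by omega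
    simp [h1, h2]
termination_by z.toNat
decreasing_by omega

lemma innerA_eq (rest : List Int) (acs : List (Int × Int)) (z : Int) (hz : 0 ≤ z) :
    (rest.foldl stepA (acs, z)).1 = acs ++ encode rest z := by
  induction rest generalizing acs z with
  | nil => simp [encode]
  | cons v t ih =>
    by_cases hv : v = 0
    · simp only [List.foldl_cons, stepA, encode, hv]
      exact ih acs (z + 1) (by omega)
    · simp only [List.foldl_cons, stepA, if_neg hv, zrlLoop_eq acs z hz]
      rw [ih _ 0 (by omega)]
      simp [encode, hv, List.append_assoc]

lemma innerB_eq (rest : List Int) (acs : List (Int × Int)) (s : Nat) (p : Int)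
    (hp : p + 1 ≤ (s : Int)) (hp0 : 0 ≤ p) :
    (((PySem.List.enumerate rest (s : Int)).filter (fun q => 1 ≤ q.1 ∧ q.2 ≠ 0)).foldl
      stepB (acs, p)).1
    = acs ++ encode rest ((s : Int) - p - 1) := by
  induction rest generalizing acs s p with
  | nil => simp [PySem.List.enumerate, encode]
  | cons v t ih =>
    have hs1 : (1 : Int) ≤ (s : Int) := by omega
    rw [PySem.List.enumerate_cons]
    by_cases hv : v = 0
    · have hfilt : ¬ ((1 : Int) ≤ ((s : Int), v).1 ∧ ((s : Int), v).2 ≠ 0) := by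
        simp [hv]
      rw [List.filter_cons_of_neg (by simpa using hfilt)]
      have : ((s : Int) + 1) = ((s + 1 : Nat) : Int) := by push_cast; ring
      rw [this, ih acs (s + 1) p (by push_cast; omega) hp0]
      have e1 : ((s + 1 : Nat) : Int) - p - 1 = ((s : Int) - p - 1) + 1 := by push_cast; ring
      have e2 : encode (v :: t) ((s : Int) - p - 1) = encode t (((s : Int) - p - 1) + 1) := by
        simp [encode, hv]
      rw [e1, e2]
    · have hfilt : ((1 : Int) ≤ ((s : Int), v).1 ∧ ((s : Int), v).2 ≠ 0) := by
        exact ⟨hs1, hv⟩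
      rw [List.filter_cons_of_pos (by simpa using hfilt)]
      rw [List.foldl_cons]
      have hz0 : 0 ≤ (s : Int) - p - 1 := by omega
      have hfd : PySem.Int.floordiv ((s : Int) - p - 1) 16 = ((s : Int) - p - 1) / 16 :=
        PySem.Int.floordiv_eq_ediv_of_pos (by omega)
      have hmd : PySem.Int.mod ((s : Int) - p - 1) 16 = ((s : Int) - p - 1) % 16 :=
        PySem.Int.mod_eq_emod_of_pos (by omega)
      simp only [stepB, hfd, hmd]
      have : ((s : Int) + 1) = ((s + 1 : Nat) : Int) := by push_cast; ring
      rw [this, ih _ (s + 1) (s : Int) (by push_cast; omega) (by omega)]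
      have hz1 : ((s + 1 : Nat) : Int) - (s : Int) - 1 = 0 := by push_cast; ring
      simp [encode, hv, List.append_assoc]

lemma outerA_eq (coeffs : List (List Int)) (dcs : List Int) (acs : List (Int × Int)) (prev : Int) :
    coeffs.foldl stepOuterA (dcs, acs, prev)
    = (dcs ++ diffsI (coeffs.map dcOf) prev, acs ++ acAll coeffs, lastDC coeffs prev) := by
  induction coeffs generalizing dcs acs prev with
  | nil => simp [diffsI, acAll, lastDC]
  | cons zz t ih =>
    rw [List.foldl_cons]
    have hslice : PySem.List.slice zz (some 1) none = zz.drop 1 := by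
      exact_mod_cast PySem.List.slice_from_natCast zz 1
    have hstep : stepOuterA (dcs, acs, prev) zz
        = (dcs ++ [dcOf zz - prev], acs ++ encode (zz.drop 1) 0 ++ [(0, 0)], dcOf zz) := by
      simp only [stepOuterA, hslice, dcOf]
      rw [innerA_eq (zz.drop 1) acs 0 (by omega)]
    rw [hstep, ih]
    simp [diffsI, acAll, lastDC, dcOf, List.append_assoc]

lemma outerB_eq (coeffs : List (List Int)) (acs : List (Int × Int)) :
    coeffs.foldl stepOuterB acs = acs ++ acAll coeffs := by
  induction coeffs generalizing acs with
  | nil => simp [acAll]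
  | cons zz t ih =>
    rw [List.foldl_cons, ih]
    have hstep : stepOuterB acs zz = acs ++ encode (zz.drop 1) 0 ++ [(0, 0)] := by
      cases zz with
      | nil => simp [stepOuterB, PySem.List.enumerate, encode]
      | cons h r =>
        simp only [stepOuterB]
        rw [PySem.List.enumerate_cons]
        have hfilt : ¬ ((1 : Int) ≤ ((0 : Int), h).1 ∧ ((0 : Int), h).2 ≠ 0) := by
          simp
        rw [List.filter_cons_of_neg (by simpa using hfilt)]
        have h1 : ((0 : Int) + 1) = ((1 : Nat) : Int) := by omega
        rw [h1, innerB_eq r (acs) 1 0 (by norm_num) (by omega)]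
        norm_num
    rw [hstep]
    simp [acAll, List.append_assoc]

lemma zip_shift (l : List Int) (prev : Int) :
    ((l.zip (prev :: l.dropLast)).map (fun p => p.1 - p.2)) = diffsI l prev := by
  induction l generalizing prev with
  | nil => simp [diffsI]
  | cons h t ih =>
    cases t with
    | nil => simp [diffsI]
    | cons h2 t2 =>
      rw [List.dropLast_cons₂, List.zip_cons_cons, List.map_cons, ih h]
      rfl

-- ===== VERDICT (by name: the statement is the Claim_ definition above) =====
theorem coeffs_to_dc_ac_spec : Claim_equal_coeffs_to_dc_ac := by
  intro coeffs _ _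
  unfold Spec_coeffs_to_dc_ac
  simp only [coeffs_to_dc_ac, coeffs_to_dc_ac_alt, outerA_eq, outerB_eq, zip_shift]
  rfl
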